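-- pv_equiv track=rewrite | github.com/volcengine/verl | atropos/environments/intern_bootcamp/internbootcamp_lib/internbootcamp/bootcamp/fknights/fknights.py | generate_initial_positions
-- ===== SOURCE A (Python) =====
-- def generate_initial_positions(n):
--     positions = []
--     y = 0
--     k = 0
--     while y < n:
--         if k % 2 == 0:
--             positions.append((k, 0))
--             y += 1
--         else:
--             if n - y == 1:
--                 positions.append((k, 0))
--                 y += 1
--             else:
--                 positions.append((k, 0))
--                 positions.append((k, 3))
--                 y += 2
--         k += 1
--     return positions
-- ===== SOURCE B (Python) =====
-- def generate_initial_positions(n):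
--     if n <= 0:
--         return []
--     q, r = divmod(n, 3)
--     positions = []
--     for j in range(q):
--         positions += [(2 * j, 0), (2 * j + 1, 0), (2 * j + 1, 3)]
--     if r >= 1:
--         positions.append((2 * q, 0))
--     if r == 2:
--         positions.append((2 * q + 1, 0))
--     return positions
-- ===== Notes on version B (the rewrite author's own statement) =====
-- stated objective: simpler
-- what changed: Replaces the stateful while-loop with parity and remaining-count branching by a closed-form grouped construction: q,r = divmod(n,3), emit q triples [(2j,0),(2j+1,0),(2j+1,3)] and then r leftover squares.
import Mathlib
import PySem

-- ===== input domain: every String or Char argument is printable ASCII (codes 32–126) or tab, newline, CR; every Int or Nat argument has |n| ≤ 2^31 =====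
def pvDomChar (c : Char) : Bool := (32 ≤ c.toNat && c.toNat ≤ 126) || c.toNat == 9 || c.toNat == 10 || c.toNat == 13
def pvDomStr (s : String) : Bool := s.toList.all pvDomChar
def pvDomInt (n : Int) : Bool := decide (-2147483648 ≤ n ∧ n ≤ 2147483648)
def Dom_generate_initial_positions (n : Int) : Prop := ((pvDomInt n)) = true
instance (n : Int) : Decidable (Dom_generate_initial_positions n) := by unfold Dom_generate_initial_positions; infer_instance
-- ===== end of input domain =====

-- B replaces A's stateful while-loop (parity of k, n-y==1 branch) by a closed-form grouped construction from divmod(n,3): simpler, same O(n) cost.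


-- ===== PORT A =====
-- while-loop state (positions, y, k); terminates because n - y decreases
def pvALoop (n : Int) (positions : List (Int × Int)) (y k : Int) : List (Int × Int) :=
  if _h : y < n then
    if PySem.Int.mod k 2 == 0 then
      pvALoop n (positions ++ [(k, 0)]) (y + 1) (k + 1)
    else
      if n - y == 1 then
        pvALoop n (positions ++ [(k, 0)]) (y + 1) (k + 1)
      else
        pvALoop n (positions ++ [(k, 0), (k, 3)]) (y + 2) (k + 1)
  else positions
termination_by (n - y).toNat
decreasing_by all_goals omega

def generate_initial_positions (n : Int) : List (Int × Int) :=
  pvALoop n [] 0 0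

-- ===== PORT B =====
def generate_initial_positions_alt (n : Int) : List (Int × Int) :=
  if n ≤ 0 then []
  else
    let q := PySem.Int.floordiv n 3
    let r := PySem.Int.mod n 3
    let positions :=
      (PySem.List.pyRange 0 q 1).foldl
        (fun acc j => acc ++ [(2 * j, 0), (2 * j + 1, 0), (2 * j + 1, 3)]) []
    let positions := if r ≥ 1 then positions ++ [(2 * q, 0)] else positions
    if r == 2 then positions ++ [(2 * q + 1, 0)] else positions

-- ===== PRECONDITION & SPEC =====
def Spec_generate_initial_positions (n : Int) (out : List (Int × Int)) : Prop := out = generate_initial_positions_alt n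
instance (n : Int) (out : List (Int × Int)) : Decidable (Spec_generate_initial_positions n out) := by unfold Spec_generate_initial_positions; infer_instance

-- ===== CLAIM (what is proved, stated in full; the proofs are below) =====
def Claim_equal_generate_initial_positions : Prop := ∀ (n : Int), Dom_generate_initial_positions n → Spec_generate_initial_positions n (generate_initial_positions n)

-- ===== LEMMAS AND PROOFS =====

-- the list the loop still produces with m squares remaining and next (even) column k
def pvRest : Nat → Int → List (Int × Int)
  | 0, _ => []
  | 1, k => [(k, 0)]
  | 2, k => [(k, 0), (k + 1, 0)]
  | m + 3, k => [(k, 0), (k + 1, 0), (k + 1, 3)] ++ pvRest m (k + 2)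

theorem pvMod_two_even (j : Int) : PySem.Int.mod (2 * j) 2 = 0 :=
  (PySem.Int.mod_eq_zero_iff_dvd _ _).mpr ⟨j, rfl⟩

-- loop invariant: at the head of iteration k = 2j the loop has placed y = 3j knights
theorem pvLoop_eq (m : Nat) (n j : Int) (acc : List (Int × Int))
    (h : n - 3 * j = (m : Int)) :
    pvALoop n acc (3 * j) (2 * j) = acc ++ pvRest m (2 * j) := by
  match m with
  | 0 =>
    rw [pvALoop]
    rw [dif_neg (by omega : ¬ (3 * j < n))]
    simp [pvRest]
  | 1 =>
    rw [pvALoop]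
    rw [dif_pos (by omega : 3 * j < n)]
    simp only [pvMod_two_even, BEq.rfl, if_true]
    rw [pvALoop]
    rw [dif_neg (by omega : ¬ (3 * j + 1 < n))]
    simp [pvRest]
  | 2 =>
    rw [pvALoop]
    rw [dif_pos (by omega : 3 * j < n)]
    simp only [pvMod_two_even, BEq.rfl, if_true]
    rw [pvALoop]
    rw [dif_pos (by omega : 3 * j + 1 < n)]
    have h1 : (PySem.Int.mod (2 * j + 1) 2 == 0) = false := by
      simp
    rw [h1]
    simp only [Bool.false_eq_true, if_false]
    have h2 : (n - (3 * j + 1) == 1) = true := by simp; omega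
    rw [h2]
    simp only [if_true]
    rw [pvALoop]
    rw [dif_neg (by omega : ¬ (3 * j + 1 + 1 < n))]
    simp [pvRest]
  | m' + 3 =>
    rw [pvALoop]
    rw [dif_pos (by omega : 3 * j < n)]
    simp only [pvMod_two_even, BEq.rfl, if_true]
    rw [pvALoop]
    rw [dif_pos (by omega : 3 * j + 1 < n)]
    have h1 : (PySem.Int.mod (2 * j + 1) 2 == 0) = false := by
      simp
    rw [h1]
    simp only [Bool.false_eq_true, if_false]
    have h2 : (n - (3 * j + 1) == 1) = false := by simp; omega
    rw [h2]
    simp only [Bool.false_eq_true, if_false]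
    have hrec := pvLoop_eq m' n (j + 1)
      ((acc ++ [(2 * j, 0)]) ++ [(2 * j + 1, 0), (2 * j + 1, 3)]) (by push_cast at h ⊢; omega)
    have e1 : 3 * (j + 1) = 3 * j + 1 + 2 := by ring
    have e2 : 2 * (j + 1) = 2 * j + 1 + 1 := by ring
    rw [e1, e2] at hrec
    rw [hrec]
    have e4 : 2 * j + 1 + 1 = 2 * j + 2 := by ring
    rw [e4]
    simp [pvRest]
termination_by m

-- pvRest in closed grouped form: q full triples starting at column 2j, then the r leftovers
theorem pvRest_decomp (q : Nat) : ∀ (j : Int) (r : Nat), r < 3 →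
    pvRest (3 * q + r) (2 * j) =
      (PySem.List.pyRange j (j + (q : Int)) 1).flatMap
        (fun i => [(2 * i, 0), (2 * i + 1, 0), (2 * i + 1, 3)]) ++ pvRest r (2 * (j + (q : Int))) := by
  induction q with
  | zero =>
    intro j r _
    rw [PySem.List.pyRange_one_eq_nil (by omega)]
    simp
  | succ q ih =>
    intro j r hr
    have e : 3 * (q + 1) + r = (3 * q + r) + 3 := by omega
    rw [e]
    show ([(2 * j, 0), (2 * j + 1, 0), (2 * j + 1, 3)] ++ pvRest (3 * q + r) (2 * j + 2)) = _
    have e2 : 2 * j + 2 = 2 * (j + 1) := by ring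
    rw [e2, ih (j + 1) r hr]
    push_cast
    rw [PySem.List.pyRange_one_cons (by omega : j < j + ((q : Int) + 1))]
    have e3 : j + 1 + (q : Int) = j + ((q : Int) + 1) := by ring
    simp [List.flatMap_cons, e3]

-- ===== VERDICT (by name: the statement is the Claim_ definition above) =====
theorem generate_initial_positions_spec : Claim_equal_generate_initial_positions := by
  intro n _
  unfold Spec_generate_initial_positions generate_initial_positions generate_initial_positions_alt
  by_cases hn : n ≤ 0
  · rw [if_pos hn, pvALoop]
    rw [dif_neg (by omega : ¬ ((0:Int) < n))]
  · rw [if_neg hn]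
    set q := PySem.Int.floordiv n 3 with hq
    set r := PySem.Int.mod n 3 with hr
    have hqr : q * 3 + r = n := PySem.Int.floordiv_mul_add_mod n 3
    have hr0 : 0 ≤ r := PySem.Int.mod_nonneg n (by omega)
    have hr3 : r < 3 := PySem.Int.mod_lt n (by omega)
    have hq0 : 0 ≤ q := by omega
    have hA : pvALoop n [] 0 0 = pvRest n.toNat 0 := by
      have := pvLoop_eq n.toNat n 0 [] (by omega)
      simpa using this
    rw [hA]
    have hn' : n.toNat = 3 * q.toNat + r.toNat := by omega
    have hrest := pvRest_decomp q.toNat 0 r.toNat (by omega)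
    have hcq : ((q.toNat : Nat) : Int) = q := by omega
    rw [hcq] at hrest
    simp only [zero_add, mul_zero] at hrest
    rw [hn', hrest]
    simp only [PySem.List.foldl_append_eq_flatMap, List.nil_append]
    have : r = 0 ∨ r = 1 ∨ r = 2 := by omega
    rcases this with h | h | h <;> rw [h] <;> simp [pvRest, show ((2:Int)).toNat = 2 from rfl, show ((1:Int)).toNat = 1 from rfl]
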